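-- pv_equiv track=rewrite | github.com/rustamwho/training_tasks | re:tail/add_cash_to_massive.py | get_result
-- ===== SOURCE A (Python) =====
-- def get_result(cash: list[int], s: int) -> int:
--     while s >= 3:
--         minimum_index = cash.index(min(cash))
--         cash[minimum_index] += 3
--         s -= 3
--     if s > 0:
--         minimum_index = cash.index(min(cash))
--         cash[minimum_index] += s
--     max_prize = max(cash)
--     result = sum(prize < max_prize for prize in cash)
--     return result
-- ===== SOURCE B (Python) =====
-- def _insert(x, a):
--     # insert x into the sorted list a, keeping it sorted (after equal elements)
--     i = 0
--     while i < len(a) and a[i] <= x: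
--         i += 1
--     return a[:i] + [x] + a[i:]
--
--
-- def get_result(cash, s):
--     a = sorted(cash)
--     while s >= 3:
--         a = _insert(a[0] + 3, a[1:])
--         s -= 3
--     if s > 0:
--         a = _insert(a[0] + s, a[1:])
--     return len(a) - a.count(a[-1])
-- ===== Notes on version B (the rewrite author's own statement) =====
-- stated objective: alternative
-- what changed: A repeatedly rescans the unsorted list with index(min(cash)) and mutates it in place; B sorts once and maintains the sorted order across the distribution loop (pop the head minimum, ordered re-insert), reading the final answer as len(a) - a.count(a[-1]) from the sorted list.
import Mathlib
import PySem

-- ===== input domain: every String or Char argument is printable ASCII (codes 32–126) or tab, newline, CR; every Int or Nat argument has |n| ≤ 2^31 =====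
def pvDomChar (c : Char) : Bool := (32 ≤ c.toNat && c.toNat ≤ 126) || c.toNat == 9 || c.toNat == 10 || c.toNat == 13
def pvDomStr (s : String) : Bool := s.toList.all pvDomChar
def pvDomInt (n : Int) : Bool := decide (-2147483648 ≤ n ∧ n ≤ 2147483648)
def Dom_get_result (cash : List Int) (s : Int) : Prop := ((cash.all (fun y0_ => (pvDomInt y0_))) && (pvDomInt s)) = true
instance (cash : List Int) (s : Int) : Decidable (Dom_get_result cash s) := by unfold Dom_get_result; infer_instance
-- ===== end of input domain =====

-- B replaces A's per-iteration index(min(...)) scans over a mutated list by sorting once and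
-- maintaining the sorted order (pop the head, ordered re-insert); objective: alternative algorithm,
-- similar cost. A mutates its `cash` argument in place; B does not — the equivalence proved here
-- is about the RETURN value only.

-- ===== PORT A =====
-- A's while-loop: each iteration bumps the first occurrence of the minimum by 3, s -= 3.
-- Python's min([]) raises ValueError; the `none` branch is unreachable under Pre_ (cash ≠ [],
-- and the loop preserves the length) and only makes the recursion total.
def get_result_go (cash : List Int) (s : Int) : List Int × Int :=
  if _h : 3 ≤ s then
    match PySem.List.min? cash (fun x => x) with
    | none => (cash, s)
    | some m =>
      let i := (PySem.List.index? cash m).getD 0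
      get_result_go (cash.set i (cash.getD i 0 + 3)) (s - 3)
  else (cash, s)
termination_by s.toNat
decreasing_by omega

def get_result (cash : List Int) (s : Int) : Int :=
  let r := get_result_go cash s
  let cash1 := r.1
  let s1 := r.2
  let cash2 :=
    if 0 < s1 then
      match PySem.List.min? cash1 (fun x => x) with
      | none => cash1   -- min([]) raises; unreachable under Pre_
      | some m =>
        let i := (PySem.List.index? cash1 m).getD 0
        cash1.set i (cash1.getD i 0 + s1)
    else cash1
  let max_prize := (PySem.List.max? cash2 (fun x => x)).getD 0   -- max([]) raises; outside Pre_
  cash2.foldl (fun acc prize => if prize < max_prize then acc + 1 else acc) 0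

-- ===== PORT B =====
-- Source B's _insert: scan for the insertion point (stays behind strictly larger elements), then splice.
def bInsertIdx (x : Int) : List Int → Nat
  | [] => 0
  | y :: t => if y ≤ x then bInsertIdx x t + 1 else 0

def bInsert (x : Int) (a : List Int) : List Int :=
  let i := bInsertIdx x a
  a.take i ++ [x] ++ a.drop i

-- Source B's while-loop: pop the head of the sorted list, +3, ordered re-insert.
-- a[0] raises IndexError on []; the `[]` branch is unreachable under Pre_.
def get_result_alt_go (a : List Int) (s : Int) : List Int × Int :=
  if _h : 3 ≤ s then
    match a with
    | [] => ([], s)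
    | h0 :: t => get_result_alt_go (bInsert (h0 + 3) t) (s - 3)
  else (a, s)
termination_by s.toNat
decreasing_by omega

def get_result_alt (cash : List Int) (s : Int) : Int :=
  let r := get_result_alt_go (PySem.List.sorted cash (fun x => x) false) s
  let a1 := r.1
  let s1 := r.2
  let a2 :=
    if 0 < s1 then
      match a1 with
      | [] => a1        -- a[0] raises; unreachable under Pre_
      | h0 :: t => bInsert (h0 + s1) t
    else a1
  let top := (PySem.List.pyGet? a2 (-1)).getD 0   -- a[-1] raises on []; outside Pre_
  (a2.length : Int) - (PySem.List.count a2 top : Int)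

-- ===== PRECONDITION & SPEC =====
-- Python A raises ValueError (min()/max() of an empty sequence) exactly when cash = [].
def Pre_get_result (cash : List Int) (s : Int) : Prop := cash ≠ []
instance (cash : List Int) (s : Int) : Decidable (Pre_get_result cash s) := by unfold Pre_get_result; infer_instance
def pvWitness_get_result : List Int × Int := ([3, 1, 2], 7)

def Spec_get_result (cash : List Int) (s : Int) (out : Int) : Prop := out = get_result_alt cash s
instance (cash : List Int) (s : Int) (out : Int) : Decidable (Spec_get_result cash s out) := by unfold Spec_get_result; infer_instance

-- ===== CLAIM (what is proved, stated in full; the proofs are below) =====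
def Claim_equal_get_result : Prop := ∀ (cash : List Int) (s : Int), Dom_get_result cash s → Pre_get_result cash s → Spec_get_result cash s (get_result cash s)

-- ===== LEMMAS AND PROOFS =====

theorem bInsert_cons (x y : Int) (t : List Int) :
    bInsert x (y :: t) = if y ≤ x then y :: bInsert x t else x :: y :: t := by
  simp only [bInsert, bInsertIdx]
  split <;> simp

theorem bInsert_perm (x : Int) (a : List Int) : (bInsert x a).Perm (x :: a) := by
  induction a with
  | nil => simp [bInsert, bInsertIdx]
  | cons y t ih =>
    rw [bInsert_cons]
    split
    · exact ((ih.cons y).trans (List.Perm.swap x y t))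
    · exact List.Perm.refl _

theorem mem_bInsert (z x : Int) (a : List Int) : z ∈ bInsert x a ↔ z = x ∨ z ∈ a := by
  have := (bInsert_perm x a).mem_iff (a := z)
  simpa using this

theorem bInsert_pairwise (x : Int) (a : List Int) (h : a.Pairwise (· ≤ ·)) :
    (bInsert x a).Pairwise (· ≤ ·) := by
  induction a with
  | nil => simp [bInsert, bInsertIdx]
  | cons y t ih =>
    rw [bInsert_cons]
    rcases List.pairwise_cons.mp h with ⟨hy, ht⟩
    split
    · rename_i hyx
      refine List.pairwise_cons.mpr ⟨?_, ih ht⟩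
      intro z hz
      rcases (mem_bInsert z x t).mp hz with rfl | hz
      · exact hyx
      · exact hy z hz
    · rename_i hyx
      refine List.pairwise_cons.mpr ⟨?_, h⟩
      intro z hz
      rcases List.mem_cons.mp hz with rfl | hz
      · omega
      · exact le_trans (by omega) (hy z hz)

theorem min?_of_perm_sorted (la : List Int) (h : Int) (t : List Int)
    (hp : la.Perm (h :: t)) (hs : (h :: t).Pairwise (· ≤ ·)) :
    PySem.List.min? la (fun x => x) = some h := by
  have hne : la ≠ [] := by
    intro e; subst e; exact absurd hp.symm.length_eq (by simp)
  cases hm : PySem.List.min? la (fun x => x) with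
  | none => exact absurd ((PySem.List.min?_eq_none_iff la _).mp hm) hne
  | some m =>
    have hmin := PySem.List.min?_isMin hm
    have hmem := PySem.List.min?_mem hm
    have hml : m ∈ h :: t := hp.mem_iff.mp hmem
    have hhl : h ∈ la := hp.mem_iff.mpr (List.mem_cons_self)
    have h1 : m ≤ h := hmin h hhl
    have h2 : h ≤ m := by
      rcases List.mem_cons.mp hml with rfl | hmt
      · exact le_refl _
      · exact (List.pairwise_cons.mp hs).1 m hmt
    have : m = h := le_antisymm h1 h2
    rw [this]

theorem step_sim (la : List Int) (h : Int) (t : List Int) (d : Int)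
    (hp : la.Perm (h :: t)) (hs : (h :: t).Pairwise (· ≤ ·)) :
    PySem.List.min? la (fun x => x) = some h ∧
    (la.set ((PySem.List.index? la h).getD 0)
        (la.getD ((PySem.List.index? la h).getD 0) 0 + d)).Perm ((h + d) :: t) := by
  have hmin := min?_of_perm_sorted la h t hp hs
  have hmem : h ∈ la := PySem.List.min?_mem hmin
  rcases Option.isSome_iff_exists.mp ((PySem.List.index?_isSome_iff la h).mpr hmem) with ⟨k, hk⟩
  rcases (PySem.List.index?_eq_some_iff la h k).mp hk with ⟨pre, suf, rfl, hlen, hnp⟩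
  refine ⟨hmin, ?_⟩
  rw [hk]
  simp only [Option.getD_some]
  subst hlen
  have hget : (pre ++ h :: suf).getD pre.length 0 = h := by
    simp [List.getD]
  rw [hget, List.set_append]
  simp only [lt_irrefl, Nat.sub_self, List.set_cons_zero]
  have p1 : (pre ++ (h + d) :: suf).Perm ((h + d) :: (pre ++ suf)) := List.perm_middle
  have p2 : (pre ++ suf).Perm t := by
    have : ((h :: (pre ++ suf)) : List Int).Perm (h :: t) := List.perm_middle.symm.trans hp
    exact this.cons_inv
  exact p1.trans (p2.cons _)

theorem go_sim (n : Nat) (s : Int) (la lb : List Int) (hn : s.toNat ≤ n)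
    (hp : la.Perm lb) (hs : lb.Pairwise (· ≤ ·)) (hne : la ≠ []) :
    (get_result_go la s).1.Perm (get_result_alt_go lb s).1 ∧
    (get_result_alt_go lb s).1.Pairwise (· ≤ ·) ∧
    (get_result_go la s).2 = (get_result_alt_go lb s).2 ∧
    (get_result_go la s).1 ≠ [] := by
  induction n generalizing s la lb with
  | zero =>
    have h3 : ¬ 3 ≤ s := by omega
    rw [get_result_go, get_result_alt_go.eq_def, dif_neg h3, dif_neg h3]
    exact ⟨hp, hs, rfl, hne⟩
  | succ n ih =>
    by_cases h3 : 3 ≤ s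
    · cases lb with
      | nil => exact absurd (List.Perm.eq_nil hp) hne
      | cons h0 t =>
        obtain ⟨hmin, hperm⟩ := step_sim la h0 t 3 hp hs
        rw [get_result_go, get_result_alt_go.eq_def, dif_pos h3, dif_pos h3, hmin]
        have hperm' : (la.set ((PySem.List.index? la h0).getD 0)
            (la.getD ((PySem.List.index? la h0).getD 0) 0 + 3)).Perm (bInsert (h0 + 3) t) :=
          hperm.trans (bInsert_perm (h0 + 3) t).symm
        refine ih (s - 3) _ _ (by omega) hperm'
          (bInsert_pairwise _ _ (List.pairwise_cons.mp hs).2) ?_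
        intro e
        have := hperm.length_eq
        rw [e] at this
        simp at this
    · rw [get_result_go, get_result_alt_go.eq_def, dif_neg h3, dif_neg h3]
      exact ⟨hp, hs, rfl, hne⟩

theorem getLast_is_max (l : List Int) (hs : l.Pairwise (· ≤ ·)) (hne : l ≠ []) :
    ∀ y ∈ l, y ≤ l.getLast hne := by
  induction l with
  | nil => exact absurd rfl hne
  | cons a t ih =>
    rcases List.pairwise_cons.mp hs with ⟨ha, ht⟩
    intro y hy
    cases t with
    | nil => simp at hy ⊢; omega
    | cons b t' =>
      rw [List.getLast_cons (by simp)]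
      rcases List.mem_cons.mp hy with rfl | hyt
      · exact ha _ (List.getLast_mem _)
      · exact ih ht (by simp) y hyt

theorem max?_of_perm_sorted (la lb : List Int) (hp : la.Perm lb)
    (hs : lb.Pairwise (· ≤ ·)) (hne : lb ≠ []) :
    PySem.List.max? la (fun x => x) = some (lb.getLast hne) := by
  have hnea : la ≠ [] := by
    intro e; subst e
    exact hne (List.Perm.eq_nil hp.symm)
  cases hm : PySem.List.max? la (fun x => x) with
  | none => exact absurd ((PySem.List.max?_eq_none_iff la _).mp hm) hnea
  | some M =>
    have hmax := PySem.List.max?_isMax hm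
    have hmem : M ∈ lb := hp.mem_iff.mp (PySem.List.max?_mem hm)
    have h1 : M ≤ lb.getLast hne := getLast_is_max lb hs hne M hmem
    have h2 : lb.getLast hne ≤ M :=
      hmax _ (hp.mem_iff.mpr (List.getLast_mem hne))
    rw [le_antisymm h1 h2]

theorem foldl_count_ite (p : Int → Prop) [DecidablePred p] (l : List Int) (a : Int) :
    l.foldl (fun acc x => if p x then acc + 1 else acc) a
      = a + (List.countP (fun x => decide (p x)) l : Int) := by
  induction l generalizing a with
  | nil => simp
  | cons x t ih =>
    simp only [List.foldl_cons, List.countP_cons, ih]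
    by_cases h : p x <;> simp [h] <;> ring

theorem count_final (la lb : List Int) (hp : la.Perm lb) (hs : lb.Pairwise (· ≤ ·)) (hne : lb ≠ []) :
    la.foldl (fun acc prize => if prize < (PySem.List.max? la (fun x => x)).getD 0 then acc + 1 else acc) 0
      = (lb.length : Int) - (PySem.List.count lb ((PySem.List.pyGet? lb (-1)).getD 0) : Int) := by
  obtain ⟨M, hM, hMdef⟩ : ∃ M, PySem.List.max? la (fun x => x) = some M ∧ M = lb.getLast hne :=
    ⟨lb.getLast hne, max?_of_perm_sorted la lb hp hs hne, rfl⟩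
  rw [foldl_count_ite (fun z => z < (PySem.List.max? la (fun x => x)).getD 0) la 0,
    PySem.List.pyGet?_neg_one, List.getLast?_eq_some_getLast hne, ← hMdef]
  have hgetD : (PySem.List.max? la (fun x => x)).getD 0 = M := by rw [hM]; rfl
  have h1 : List.countP (fun z => decide (z < (PySem.List.max? la (fun x => x)).getD 0)) la
      = List.countP (fun z => decide (z < M)) lb := by
    rw [hp.countP_eq]
    exact List.countP_congr (by intro x hx; simp [hgetD])
  have hsplit := List.length_eq_countP_add_countP (l := lb) (fun z => decide (z = M))
  have hcongr : List.countP (fun z => decide ¬ (decide (z = M)) = true) lb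
      = List.countP (fun z => decide (z < M)) lb := by
    apply List.countP_congr
    intro x hx
    have hle : x ≤ M := by rw [hMdef]; exact getLast_is_max lb hs hne x hx
    simp only [decide_eq_true_eq]
    constructor
    · intro hne'; omega
    · intro hlt; simpa using (by omega : ¬ x = M)
  have hcount : PySem.List.count lb M = List.countP (fun z => decide (z = M)) lb := by
    rw [PySem.List.count_eq, List.count]
    apply List.countP_congr
    intro x hx
    simp
  rw [h1]
  simp only [Option.getD_some]
  rw [hcount]
  omega


-- ===== VERDICT (by name: the statement is the Claim_ definition above) =====
theorem get_result_spec : Claim_equal_get_result := by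
  unfold Claim_equal_get_result
  intro cash s _ hpre
  unfold Spec_get_result get_result get_result_alt
  dsimp only
  have hp : cash.Perm (PySem.List.sorted cash (fun x => x) false) :=
    (PySem.List.sorted_perm cash (fun x => x) false).symm
  have hs : (PySem.List.sorted cash (fun x => x) false).Pairwise (· ≤ ·) :=
    PySem.List.sorted_pairwise cash (fun x => x)
  obtain ⟨P1, P2, Es, Nne⟩ := go_sim s.toNat s cash _ (le_refl _) hp hs hpre
  rcases hA : get_result_go cash s with ⟨A1, s1⟩
  rcases hB : get_result_alt_go (PySem.List.sorted cash (fun x => x) false) s with ⟨B1, s2⟩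
  rw [hA] at P1 Es Nne
  rw [hB] at P1 P2 Es
  dsimp only at P1 P2 Es Nne ⊢
  subst Es
  by_cases hpos : 0 < s1
  · rw [if_pos hpos, if_pos hpos]
    cases B1 with
    | nil => exact absurd (List.Perm.eq_nil P1) Nne
    | cons h0 t =>
      obtain ⟨hmin, hperm⟩ := step_sim A1 h0 t s1 P1 P2
      rw [hmin]
      have hperm' := hperm.trans (bInsert_perm (h0 + s1) t).symm
      have hbne : bInsert (h0 + s1) t ≠ [] := by
        intro e
        have := (bInsert_perm (h0 + s1) t).length_eq
        rw [e] at this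
        simp at this
      exact count_final _ _ hperm' (bInsert_pairwise _ _ (List.pairwise_cons.mp P2).2) hbne
  · rw [if_neg hpos, if_neg hpos]
    have hbne : B1 ≠ [] := by
      intro e; subst e; exact Nne (List.Perm.eq_nil P1)
    exact count_final _ _ P1 P2 hbne
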